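-- pv_equiv track=rewrite | github.com/bruhismyname/Praktikum-ASA-D2 | Pertemuan 2/fibonacci.py | proses_array
-- ===== SOURCE A (Python) =====
-- def fibonacci(n):
--     if n <= 0:
--         return 0
--     elif n == 1:
--         return 1
--
--     a, b = 0, 1
--     for _ in range(2, n + 1):
--         a, b = b, a + b
--     return b
--
-- def factorial(n):
--     if n <= 1:
--         return 1
--     result = 1
--     for i in range(2, n + 1):
--         result *= i
--     return result
--
-- def proses_array(arr, pilihan):
--     total = 0
--     for num in arr:
--         if pilihan == 1:
--             total += fibonacci(num)
--         else:
--             total += factorial(num)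
--     return total
-- ===== SOURCE B (Python) =====
-- def proses_array(arr, pilihan):
--     # Build one fib/factorial table up to max(arr), then O(1) lookups: O(n + M) instead of O(n * M).
--     if not arr:
--         return 0
--     m = max(arr)
--     if pilihan == 1:
--         table = [0, 1]
--         for i in range(2, m + 1):
--             table.append(table[i - 1] + table[i - 2])
--         return sum(table[n] if n > 0 else 0 for n in arr)
--     else:
--         table = [1]
--         for i in range(1, m + 1):
--             table.append(table[i - 1] * i)
--         return sum(table[n] if n > 1 else 1 for n in arr)
-- ===== Notes on version B (the rewrite author's own statement) =====
-- stated objective: faster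
-- what changed: Instead of running a fresh O(num) fibonacci/factorial loop for every element, B builds the fib/factorial table once up to max(arr) and sums O(1) table lookups.
import Mathlib
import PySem

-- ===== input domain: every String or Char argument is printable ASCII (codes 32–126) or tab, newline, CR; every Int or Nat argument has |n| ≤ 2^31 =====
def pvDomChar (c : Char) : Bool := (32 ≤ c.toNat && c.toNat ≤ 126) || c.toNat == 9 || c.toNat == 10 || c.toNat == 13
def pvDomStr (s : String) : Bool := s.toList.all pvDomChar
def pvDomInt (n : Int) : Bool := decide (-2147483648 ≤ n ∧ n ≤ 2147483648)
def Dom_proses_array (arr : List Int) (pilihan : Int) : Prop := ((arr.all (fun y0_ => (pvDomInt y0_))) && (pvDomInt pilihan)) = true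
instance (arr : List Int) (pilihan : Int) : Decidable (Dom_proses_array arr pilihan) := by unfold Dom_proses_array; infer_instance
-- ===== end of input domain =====

-- B replaces the per-element fibonacci/factorial loops by one table built up to max(arr)
-- followed by O(1) lookups (O(n + M) instead of O(n·M)); measured faster.

-- ===== PORT A =====
def pvFibA (n : Int) : Int :=
  if n ≤ 0 then 0
  else if n = 1 then 1
  else ((PySem.List.pyRange 2 (n + 1) 1).foldl
          (fun (ab : Int × Int) _ => (ab.2, ab.1 + ab.2)) (0, 1)).2

def pvFactA (n : Int) : Int :=
  if n ≤ 1 then 1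
  else (PySem.List.pyRange 2 (n + 1) 1).foldl (fun result i => result * i) 1

def proses_array (arr : List Int) (pilihan : Int) : Int :=
  arr.foldl (fun total num =>
    if pilihan = 1 then total + pvFibA num else total + pvFactA num) 0

-- ===== PORT B =====
-- table[i-1], table[i-2] in Source B are always in range; pyGetD is exact there.
def pvFibTable (m : Int) : List Int :=
  (PySem.List.pyRange 2 (m + 1) 1).foldl
    (fun t i => t ++ [PySem.List.pyGetD t (i - 1) 0 + PySem.List.pyGetD t (i - 2) 0])
    [0, 1]

def pvFactTable (m : Int) : List Int :=
  (PySem.List.pyRange 1 (m + 1) 1).foldl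
    (fun t i => t ++ [PySem.List.pyGetD t (i - 1) 0 * i])
    [1]

def proses_array_alt (arr : List Int) (pilihan : Int) : Int :=
  if arr = [] then 0
  else
    -- max(arr); arr ≠ [] so max? is some and the default is never used
    let m := (PySem.List.max? arr (fun y => y)).getD 0
    if pilihan = 1 then
      let t := pvFibTable m
      (arr.map (fun n => if 0 < n then PySem.List.pyGetD t n 0 else 0)).sum
    else
      let t := pvFactTable m
      (arr.map (fun n => if 1 < n then PySem.List.pyGetD t n 0 else 1)).sum

-- ===== PRECONDITION & SPEC =====
def Spec_proses_array (arr : List Int) (pilihan : Int) (out : Int) : Prop := out = proses_array_alt arr pilihan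
instance (arr : List Int) (pilihan : Int) (out : Int) : Decidable (Spec_proses_array arr pilihan out) := by unfold Spec_proses_array; infer_instance

-- ===== CLAIM (what is proved, stated in full; the proofs are below) =====
def Claim_equal_proses_array : Prop := ∀ (arr : List Int) (pilihan : Int), Dom_proses_array arr pilihan → Spec_proses_array arr pilihan (proses_array arr pilihan)

-- ===== LEMMAS AND PROOFS =====

-- mathematical bridge
def fibM : Nat → Int
  | 0 => 0
  | 1 => 1
  | n + 2 => fibM n + fibM (n + 1)

def factM : Nat → Int
  | 0 => 1
  | n + 1 => factM n * ((n : Int) + 1)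

theorem fibA_loop (k : Nat) :
    (PySem.List.pyRange 2 ((k : Int) + 2) 1).foldl
      (fun (ab : Int × Int) _ => (ab.2, ab.1 + ab.2)) (0, 1)
      = (fibM k, fibM (k + 1)) := by
  induction k with
  | zero => simp [PySem.List.pyRange_one_eq_nil, fibM]
  | succ k ih =>
    have h : ((k + 1 : Nat) : Int) + 2 = ((k : Int) + 2) + 1 := by push_cast; ring
    rw [h, PySem.List.pyRange_one_succ_right (by omega), List.foldl_append, ih]
    simp [fibM]

theorem fibA_eq (n : Int) : pvFibA n = if n ≤ 0 then 0 else fibM n.toNat := by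
  unfold pvFibA
  by_cases h0 : n ≤ 0
  · simp [h0]
  · by_cases h1 : n = 1
    · subst h1; simp [fibM]
    · have h2 : 2 ≤ n := by omega
      have := fibA_loop (n.toNat - 2 + 1)
      have hc : (((n.toNat - 2 + 1 : Nat)) : Int) + 2 = n + 1 := by omega
      rw [hc] at this
      have hn : n.toNat - 2 + 1 + 1 = n.toNat := by omega
      rw [this]
      simp [h0, h1, hn]

theorem factA_loop (k : Nat) :
    (PySem.List.pyRange 2 ((k : Int) + 2) 1).foldl (fun result i => result * i) 1
      = factM (k + 1) := by
  induction k with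
  | zero => simp [PySem.List.pyRange_one_eq_nil, factM]
  | succ k ih =>
    have h : ((k + 1 : Nat) : Int) + 2 = ((k : Int) + 2) + 1 := by push_cast; ring
    rw [h, PySem.List.pyRange_one_succ_right (by omega), List.foldl_append, ih]
    simp only [List.foldl_cons, List.foldl_nil, factM]
    push_cast; ring

theorem factA_eq (n : Int) : pvFactA n = if n ≤ 1 then 1 else factM n.toNat := by
  unfold pvFactA
  by_cases h1 : n ≤ 1
  · simp [h1]
  · have := factA_loop (n.toNat - 1)
    have hc : (((n.toNat - 1 : Nat)) : Int) + 2 = n + 1 := by omega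
    rw [hc] at this
    rw [this]
    simp [h1]
    congr 1
    omega

theorem fibTable_eq (k : Nat) :
    pvFibTable ((k : Int) + 1) = (List.range (k + 2)).map fibM := by
  induction k with
  | zero =>
    unfold pvFibTable
    rw [PySem.List.pyRange_one_eq_nil (by omega)]
    simp [List.range_succ, fibM]
  | succ k ih =>
    unfold pvFibTable at *
    have h : ((k + 1 : Nat) : Int) + 1 + 1 = (((k : Int) + 1) + 1) + 1 := by push_cast; ring
    rw [h, PySem.List.pyRange_one_succ_right (by omega), List.foldl_append, ih]
    have hlen : ((List.range (k + 2)).map fibM).length = k + 2 := by simp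
    have e1 : ((k : Int) + 1 + 1) - 1 = ((k + 1 : Nat) : Int) := by omega
    have e2 : ((k : Int) + 1 + 1) - 2 = ((k : Nat) : Int) := by omega
    simp only [List.foldl_cons, List.foldl_nil, e1, e2, PySem.List.pyGetD_natCast]
    rw [List.range_succ (n := k + 2), List.map_append]
    simp [List.getD, fibM]
    ring

theorem factTable_eq (k : Nat) :
    pvFactTable (k : Int) = (List.range (k + 1)).map factM := by
  induction k with
  | zero =>
    unfold pvFactTable
    rw [PySem.List.pyRange_one_eq_nil (by omega)]
    simp [factM]
  | succ k ih =>
    unfold pvFactTable at *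
    have h : ((k + 1 : Nat) : Int) + 1 = ((k : Int) + 1) + 1 := by push_cast; ring
    rw [h, PySem.List.pyRange_one_succ_right (by omega), List.foldl_append, ih]
    have e1 : ((k : Int) + 1) - 1 = ((k : Nat) : Int) := by omega
    simp only [List.foldl_cons, List.foldl_nil, e1, PySem.List.pyGetD_natCast]
    rw [List.range_succ (n := k + 1), List.map_append]
    simp [List.getD, factM]

theorem fib_lookup (m n : Int) (h0 : 0 < n) (hm : n ≤ m) :
    PySem.List.pyGetD (pvFibTable m) n 0 = fibM n.toNat := by
  have hk : m = (((m - 1).toNat : Nat) : Int) + 1 := by omega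
  rw [hk, fibTable_eq]
  have hn : n = ((n.toNat : Nat) : Int) := by omega
  rw [hn, PySem.List.pyGetD_natCast]
  have hlt : n.toNat < m.toNat - 1 + 2 := by omega
  simp [List.getD, hlt]
  congr 1
  omega

theorem fact_lookup (m n : Int) (h0 : 1 < n) (hm : n ≤ m) :
    PySem.List.pyGetD (pvFactTable m) n 0 = factM n.toNat := by
  have hk : m = ((m.toNat : Nat) : Int) := by omega
  rw [hk, factTable_eq]
  have hn : n = ((n.toNat : Nat) : Int) := by omega
  rw [hn, PySem.List.pyGetD_natCast]
  have hlt : n.toNat < m.toNat + 1 := by omega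
  simp [List.getD, hlt]
  congr 1
  omega

-- ===== VERDICT (by name: the statement is the Claim_ definition above) =====
theorem proses_array_spec : Claim_equal_proses_array := by
  intro arr pilihan _
  unfold Spec_proses_array proses_array proses_array_alt
  by_cases he : arr = []
  · subst he; simp
  · simp only [he, ite_false]
    obtain ⟨mx, hmx⟩ : ∃ mx, PySem.List.max? arr (fun y => y) = some mx := by
      cases h : PySem.List.max? arr (fun y => y) with
      | none => exact absurd ((PySem.List.max?_eq_none_iff arr (fun y => y)).mp h) he
      | some m => exact ⟨m, rfl⟩
    have hmax : ∀ y ∈ arr, y ≤ mx := PySem.List.max?_isMax hmx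
    rw [hmx]
    simp only [Option.getD_some]
    by_cases hp : pilihan = 1
    · simp only [hp, if_true]
      rw [PySem.List.foldl_add (g := fun num => pvFibA num)]
      simp only [zero_add]
      congr 1
      apply List.map_congr_left
      intro n hn
      rw [fibA_eq]
      by_cases h0 : 0 < n
      · rw [if_neg (by omega), if_pos h0, fib_lookup mx n h0 (hmax n hn)]
      · rw [if_pos (by omega), if_neg h0]
    · simp only [hp, ite_false]
      rw [PySem.List.foldl_add (g := fun num => pvFactA num)]
      simp only [zero_add]
      congr 1
      apply List.map_congr_left
      intro n hn
      rw [factA_eq]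
      by_cases h1 : 1 < n
      · rw [if_neg (by omega), if_pos h1, fact_lookup mx n h1 (hmax n hn)]
      · rw [if_pos (by omega), if_neg h1]
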